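-- pv_equiv track=rewrite | github.com/Joshjayboy/Competitive_Programming | F_Again_Good_SubRectangle.py | max_good_subrectangle
-- ===== SOURCE A (Python) =====
-- def max_good_subrectangle(n, m, matrix):
--     # Step 1: Compute prefix sums for each column
--     prefix_sum = [[0] * (m + 1) for _ in range(n + 1)]
--
--     for i in range(1, n + 1):
--         for j in range(1, m + 1):
--             prefix_sum[i][j] = prefix_sum[i - 1][j] + \
--                 (1 if matrix[i - 1][j - 1] == '1' else 0)
--
--     max_area = 0
--
--     # Step 2: Iterate over pairs of rows
--     for top in range(1, n + 1):
--         for bottom in range(top, n + 1):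
--             count = [0] * (m + 1)
--
--             for col in range(1, m + 1):
--                 count[col] = prefix_sum[bottom][col] - prefix_sum[top - 1][col]
--
--             # Step 3: Use hashmap to find the longest subarray with the target sum
--             prefix_col_sum = 0
--             seen = {0: 0}
--
--             for col in range(1, m + 1):
--                 prefix_col_sum += count[col]
--                 target = prefix_col_sum - (bottom - top + 1)
--
--                 if target in seen:
--                     left_col = seen[target]
--                     width = col - left_col
--                     height = bottom - top + 1
--                     area = width * height
--                     max_area = max(max_area, area)
--
--                 if prefix_col_sum not in seen:
--                     seen[prefix_col_sum] = col
--
--     return max_area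
-- ===== SOURCE B (Python) =====
-- def max_good_subrectangle(n, m, matrix):
--     # Two-pointer sweep over a running column-count window instead of the
--     # prefix-sum table + hashmap: counts are non-negative, so the column
--     # prefix is non-decreasing and a moving left boundary replaces the dict.
--     best = 0
--     for top in range(n):
--         cnt = [0] * m
--         for bottom in range(top, n):
--             cnt = [c + (1 if matrix[bottom][j] == '1' else 0)
--                    for j, c in enumerate(cnt)]
--             h = bottom - top + 1
--             lo, p_lo, p = 0, 0, 0
--             for right in range(1, m + 1):
--                 p += cnt[right - 1]
--                 while p - p_lo > h:
--                     p_lo += cnt[lo]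
--                     lo += 1
--                 if p - p_lo == h:
--                     best = max(best, (right - lo) * h)
--     return best
-- ===== Notes on version B (the rewrite author's own statement) =====
-- stated objective: alternative
-- what changed: Replaces the 2D prefix-sum table and the per-row-pair hashmap of first-seen prefix values with an incrementally maintained column-count array and a monotone two-pointer window (counts are non-negative so the column prefix is non-decreasing).
import Mathlib
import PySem

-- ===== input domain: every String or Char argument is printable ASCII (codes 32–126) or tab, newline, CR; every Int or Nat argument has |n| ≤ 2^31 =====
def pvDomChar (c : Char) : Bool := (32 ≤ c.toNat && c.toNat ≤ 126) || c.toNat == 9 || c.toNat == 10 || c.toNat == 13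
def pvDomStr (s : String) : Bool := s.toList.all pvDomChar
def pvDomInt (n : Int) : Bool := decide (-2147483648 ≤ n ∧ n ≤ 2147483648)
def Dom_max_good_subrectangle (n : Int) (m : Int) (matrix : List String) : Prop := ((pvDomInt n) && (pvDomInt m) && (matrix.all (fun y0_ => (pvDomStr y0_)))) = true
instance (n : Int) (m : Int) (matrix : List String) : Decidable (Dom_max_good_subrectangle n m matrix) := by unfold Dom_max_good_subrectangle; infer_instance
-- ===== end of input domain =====

-- B replaces A's 2D prefix-sum table + per-row-pair hashmap of first-seen prefix
-- values by an incrementally maintained column-count array and a monotone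
-- two-pointer window; same result, a genuinely different algorithm ("alternative").

-- ===== PORT A =====
-- shared tiny accessor: matrix[r][j] == '1' as 1/0 (out-of-range reads as 0; Pre_ excludes them)
def pvBit (matrix : List String) (r j : Int) : Int :=
  if ((PySem.List.pyGet? matrix r).bind (fun s => PySem.Str.pyGet? s j)) = some '1' then 1 else 0

-- one row of A's prefix_sum table: prefix_sum[i][j] = prefix_sum[i-1][j] + bit
def pvRowA (matrix : List String) (mN : Nat) (prev : List Int) (i : Nat) : List Int :=
  0 :: (List.range mN).map (fun j => prev.getD (j+1) 0 + pvBit matrix ((i : Int) - 1) (j : Int))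

-- A's prefix_sum table: k rows (row 0 = zeros, as Python's range(n+1)), built row after row
def pvTableA (matrix : List String) (mN : Nat) : Nat → List (List Int)
  | 0 => []
  | 1 => [List.replicate (mN+1) 0]
  | i+2 =>
    let t := pvTableA matrix mN (i+1)
    t ++ [pvRowA matrix mN (t.getD i []) (i+1)]

-- A's step 3, one column col = j+1: running prefix, hashmap lookup, conditional insert
def pvStepA (count : List Int) (h : Int) (st : Int × PySem.Dict Int Int × Int) (j : Nat) :
    Int × PySem.Dict Int Int × Int :=
  let col := j + 1
  let pcs := st.1 + count.getD col 0
  let target := pcs - h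
  let acc := match st.2.1.get? target with
    | some l => max st.2.2 (((col : Int) - l) * h)
    | none => st.2.2
  let seen := match st.2.1.get? pcs with
    | some _ => st.2.1
    | none => st.2.1.insert pcs (col : Int)
  (pcs, seen, acc)

def pvInnerA (count : List Int) (h : Int) (mN : Nat) (acc0 : Int) : Int :=
  ((List.range mN).foldl (pvStepA count h)
    (0, (PySem.Dict.empty : PySem.Dict Int Int).insert 0 0, acc0)).2.2

def max_good_subrectangle (n : Int) (m : Int) (matrix : List String) : Int :=
  let nN := n.toNat
  let mN := m.toNat
  let table := pvTableA matrix mN (n+1).toNat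
  (List.range nN).foldl (fun best t =>
    (List.range (nN - t)).foldl (fun best b =>
      let top := t + 1
      let bottom := top + b
      let count : List Int :=
        0 :: (List.range mN).map (fun j =>
          ((table.getD bottom []).getD (j+1) 0) - ((table.getD (top-1) []).getD (j+1) 0))
      let h : Int := (bottom : Int) - (top : Int) + 1
      pvInnerA count h mN best) best) 0

-- ===== PORT B =====
-- the while loop: advance lo while p - p_lo > h (fuel mN+1 always suffices: counts are ≥ 0)
def pvAdvance (cnt : List Int) (h p : Int) : Nat → Nat → Int → Nat × Int
  | 0, lo, pl => (lo, pl)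
  | f+1, lo, pl => if p - pl > h then pvAdvance cnt h p f (lo+1) (pl + cnt.getD lo 0) else (lo, pl)

-- B's inner loop, one right = j+1: extend prefix p, move lo, record on exact window
def pvStepB (cnt : List Int) (h : Int) (mN : Nat) (st : Nat × Int × Int × Int) (j : Nat) :
    Nat × Int × Int × Int :=
  let right := j + 1
  let p := st.2.2.1 + cnt.getD (right - 1) 0
  let lp := pvAdvance cnt h p (mN+1) st.1 st.2.1
  let best := if p - lp.2 = h then max st.2.2.2 (((right : Int) - (lp.1 : Int)) * h) else st.2.2.2
  (lp.1, lp.2, p, best)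

def pvInnerB (cnt : List Int) (h : Int) (mN : Nat) (best0 : Int) : Int :=
  ((List.range mN).foldl (pvStepB cnt h mN) (0, 0, 0, best0)).2.2.2

def max_good_subrectangle_alt (n : Int) (m : Int) (matrix : List String) : Int :=
  let nN := n.toNat
  let mN := m.toNat
  (List.range nN).foldl (fun best top =>
    ((List.range (nN - top)).foldl (fun (st : List Int × Int) b =>
        let bottom := top + b
        let cnt := (PySem.List.enumerate st.1).map (fun jc => jc.2 + pvBit matrix (bottom : Int) jc.1)
        let h : Int := (bottom : Int) - (top : Int) + 1
        (cnt, pvInnerB cnt h mN st.2))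
      (List.replicate mN 0, best)).2) 0

-- ===== PRECONDITION & SPEC =====
-- Pre_ excludes exactly the inputs where Python A raises an IndexError:
-- with n ≥ 1 and m ≥ 1 rows 0..n-1 must exist and each have at least m characters.
def Pre_max_good_subrectangle (n : Int) (m : Int) (matrix : List String) : Prop :=
  0 < n → 0 < m →
    (n ≤ (matrix.length : Int) ∧ ∀ s ∈ matrix.take n.toNat, m ≤ (s.length : Int))
instance (n : Int) (m : Int) (matrix : List String) : Decidable (Pre_max_good_subrectangle n m matrix) := by
  unfold Pre_max_good_subrectangle; infer_instance

def pvWitness_max_good_subrectangle : Int × Int × List String := (2, 2, ["10", "11"])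

def Spec_max_good_subrectangle (n : Int) (m : Int) (matrix : List String) (out : Int) : Prop := out = max_good_subrectangle_alt n m matrix
instance (n : Int) (m : Int) (matrix : List String) (out : Int) : Decidable (Spec_max_good_subrectangle n m matrix out) := by unfold Spec_max_good_subrectangle; infer_instance

-- ===== CLAIM (what is proved, stated in full; the proofs are below) =====
def Claim_equal_max_good_subrectangle : Prop := ∀ (n : Int) (m : Int) (matrix : List String), Dom_max_good_subrectangle n m matrix → Pre_max_good_subrectangle n m matrix → Spec_max_good_subrectangle n m matrix (max_good_subrectangle n m matrix)

-- ===== LEMMAS AND PROOFS =====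

-- canonical column counts: pvC matrix j r = number of '1' bits in column j among rows 0..r-1
def pvC (matrix : List String) (j : Nat) : Nat → Int
  | 0 => 0
  | r+1 => pvC matrix j r + pvBit matrix (r : Int) (j : Int)

-- prefix sums of a count list
def pvP (cnt : List Int) : Nat → Int
  | 0 => 0
  | k+1 => pvP cnt k + cnt.getD k 0

-- first index k ≤ c with pvP cnt k = v, as an Int (mirrors A's dict of first-seen prefixes)
def pvFirst (cnt : List Int) (v : Int) : Nat → Option Int
  | 0 => if pvP cnt 0 = v then some 0 else none
  | c+1 => match pvFirst cnt v c with
    | some k => some k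
    | none => if pvP cnt (c+1) = v then some ((c : Int) + 1) else none

-- canonical count list for the row window [t, t+k)
def pvCnt (matrix : List String) (mN t k : Nat) : List Int :=
  (List.range mN).map (fun j => pvC matrix j (t+k) - pvC matrix j t)

theorem pvBit_nonneg (matrix : List String) (r j : Int) : 0 ≤ pvBit matrix r j := by
  unfold pvBit; split <;> simp

theorem pvC_mono (matrix : List String) (j : Nat) {r r' : Nat} (h : r ≤ r') :
    pvC matrix j r ≤ pvC matrix j r' := by
  induction r' with
  | zero => simp [Nat.le_zero.mp h]
  | succ k ih =>
    rcases Nat.lt_or_ge r (k+1) with hl | hg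
    · have := ih (Nat.lt_succ_iff.mp hl)
      have := pvBit_nonneg matrix (k : Int) (j : Int)
      simp only [pvC]; omega
    · have : r = k+1 := le_antisymm h hg
      simp [this]

theorem pvCnt_nonneg (matrix : List String) (mN t k : Nat) (i : Nat) :
    0 ≤ (pvCnt matrix mN t k).getD i 0 := by
  unfold pvCnt
  rcases Nat.lt_or_ge i mN with hi | hi
  · rw [List.getD_eq_getElem _ _ (by simpa using hi)]
    simp only [List.getElem_map, List.getElem_range]
    have := pvC_mono matrix i (Nat.le_add_right t k)
    omega
  · rw [List.getD_eq_default _ _ (by simpa using hi)]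

theorem pvP_mono (cnt : List Int) (hnn : ∀ i, 0 ≤ cnt.getD i 0) {a b : Nat} (h : a ≤ b) :
    pvP cnt a ≤ pvP cnt b := by
  induction b with
  | zero => simp [Nat.le_zero.mp h]
  | succ k ih =>
    rcases Nat.lt_or_ge a (k+1) with hl | hg
    · have := ih (Nat.lt_succ_iff.mp hl)
      have := hnn k
      simp only [pvP]; omega
    · have : a = k+1 := le_antisymm h hg
      simp [this]

theorem pvFirst_none (cnt : List Int) (v : Int) (c : Nat)
    (h : ∀ j ≤ c, pvP cnt j ≠ v) : pvFirst cnt v c = none := by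
  induction c with
  | zero => simp [pvFirst, h 0 (le_refl 0)]
  | succ k ih =>
    have hk : pvFirst cnt v k = none := ih (fun j hj => h j (Nat.le_succ_of_le hj))
    simp [pvFirst, hk, h (k+1) (le_refl _)]

theorem pvFirst_some (cnt : List Int) (v : Int) (c k : Nat)
    (hkc : k ≤ c) (hv : pvP cnt k = v) (hmin : ∀ j < k, pvP cnt j ≠ v) :
    pvFirst cnt v c = some (k : Int) := by
  induction c with
  | zero =>
    have : k = 0 := Nat.le_zero.mp hkc
    subst this; simp [pvFirst, hv]
  | succ c ih =>
    rcases Nat.lt_or_ge k (c+1) with hl | hg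
    · have := ih (Nat.lt_succ_iff.mp hl)
      simp [pvFirst, this]
    · have hk : k = c+1 := le_antisymm hkc hg
      subst hk
      have hnone : pvFirst cnt v c = none :=
        pvFirst_none cnt v c (fun j hj => hmin j (Nat.lt_succ_of_le hj))
      simp [pvFirst, hnone, hv]

theorem pvAdvance_spec (cnt : List Int) (h p : Int) :
    ∀ (f lo : Nat) (pl : Int), pl = pvP cnt lo →
      (∀ j < lo, p - pvP cnt j > h) →
      (∃ x, lo ≤ x ∧ x ≤ lo + f ∧ p - pvP cnt x ≤ h) →
      (pvAdvance cnt h p f lo pl).2 = pvP cnt (pvAdvance cnt h p f lo pl).1 ∧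
      p - pvP cnt (pvAdvance cnt h p f lo pl).1 ≤ h ∧
      (∀ j < (pvAdvance cnt h p f lo pl).1, p - pvP cnt j > h) := by
  intro f
  induction f with
  | zero =>
    intro lo pl hpl hmin hex
    obtain ⟨x, hx1, hx2, hx3⟩ := hex
    have hxlo : x = lo := le_antisymm (by omega) hx1
    subst hxlo
    simp only [pvAdvance]
    exact ⟨hpl, hx3, hmin⟩
  | succ f ih =>
    intro lo pl hpl hmin hex
    by_cases hc : p - pl > h
    · have hstep : pvAdvance cnt h p (f+1) lo pl = pvAdvance cnt h p f (lo+1) (pl + cnt.getD lo 0) := by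
        simp [pvAdvance, hc]
      rw [hstep]
      apply ih (lo+1) (pl + cnt.getD lo 0)
      · simp [pvP, hpl]
      · intro j hj
        rcases Nat.lt_or_ge j lo with hjl | hjg
        · exact hmin j hjl
        · have : j = lo := by omega
          subst this; rw [← hpl]; exact hc
      · obtain ⟨x, hx1, hx2, hx3⟩ := hex
        have hxg : lo + 1 ≤ x := by
          rcases Nat.lt_or_ge x (lo+1) with hxl | hxg2
          · exfalso
            have hxeq : x = lo := by omega
            subst hxeq
            rw [← hpl] at hx3
            omega
          · exact hxg2
        exact ⟨x, hxg, by omega, hx3⟩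
    · have hstep : pvAdvance cnt h p (f+1) lo pl = (lo, pl) := by
        simp [pvAdvance, hc]
      rw [hstep]
      show pl = pvP cnt lo ∧ p - pvP cnt lo ≤ h ∧ ∀ j < lo, p - pvP cnt j > h
      exact ⟨hpl, by rw [hpl] at hc; omega, hmin⟩

-- the loop invariant tying A's (prefix, dict, best) to B's (lo, p_lo, p, best)
def pvInv (cnt : List Int) (h : Int) (c : Nat)
    (sA : Int × PySem.Dict Int Int × Int) (sB : Nat × Int × Int × Int) : Prop :=
  sA.1 = pvP cnt c ∧
  (∀ v, sA.2.1.get? v = pvFirst cnt v c) ∧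
  sA.2.2 = sB.2.2.2 ∧
  sB.2.2.1 = pvP cnt c ∧
  sB.2.1 = pvP cnt sB.1 ∧
  pvP cnt c - pvP cnt sB.1 ≤ h ∧
  (∀ j < sB.1, pvP cnt c - pvP cnt j > h)

theorem pvInv_step (cnt : List Int) (h : Int) (mN : Nat)
    (hh : 1 ≤ h) (hnn : ∀ i, 0 ≤ cnt.getD i 0) (c : Nat) (hc : c < mN)
    (sA : Int × PySem.Dict Int Int × Int) (sB : Nat × Int × Int × Int)
    (hI : pvInv cnt h c sA sB) :
    pvInv cnt h (c+1) (pvStepA (0 :: cnt) h sA c) (pvStepB cnt h mN sB c) := by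
  obtain ⟨h1, h2, h3, h4, h5, h6, h7⟩ := hI
  have hmono : ∀ {a b : Nat}, a ≤ b → pvP cnt a ≤ pvP cnt b := fun hab => pvP_mono cnt hnn hab
  have hPsucc : pvP cnt (c+1) = pvP cnt c + cnt.getD c 0 := by simp [pvP]
  have hg0 : 0 ≤ cnt.getD c 0 := hnn c
  have hpcs : sA.1 + (0 :: cnt).getD (c+1) 0 = pvP cnt (c+1) := by
    rw [List.getD_cons_succ, h1]; omega
  have hp : sB.2.2.1 + cnt.getD (c+1-1) 0 = pvP cnt (c+1) := by
    simp only [Nat.add_sub_cancel]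
    rw [h4]; omega
  have hlo_le : sB.1 ≤ c := by
    by_contra hcon
    have := h7 c (by omega)
    omega
  simp only [pvStepA, pvStepB]
  rw [hpcs, hp]
  -- the two-pointer advance lands on the least feasible left boundary
  have hadv := pvAdvance_spec cnt h (pvP cnt (c+1)) (mN+1) sB.1 sB.2.1 h5
    (by intro j hj
        have := h7 j hj
        have : pvP cnt c ≤ pvP cnt (c+1) := by omega
        omega)
    (by refine ⟨c+1, by omega, by omega, by omega⟩)
  set lp := pvAdvance cnt h (pvP cnt (c+1)) (mN+1) sB.1 sB.2.1 with hlp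
  obtain ⟨ha1, ha2, ha3⟩ := hadv
  have hlp_le : lp.1 ≤ c + 1 := by
    by_contra hcon
    have := ha3 (c+1) (by omega)
    omega
  unfold pvInv
  refine ⟨rfl, ?_, ?_, rfl, ha1, ha2, ha3⟩
  · -- the dict of first-seen prefixes stays canonical
    intro v
    cases hx : sA.2.1.get? (pvP cnt (c+1)) with
    | some w =>
      rw [h2 v]
      rw [h2] at hx
      show pvFirst cnt v c = pvFirst cnt v (c+1)
      cases hv : pvFirst cnt v c with
      | some k => simp [pvFirst, hv]
      | none =>
        have hne : pvP cnt (c+1) ≠ v := by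
          intro heq
          rw [heq, hv] at hx
          simp at hx
        simp [pvFirst, hv, hne]
    | none =>
      rw [PySem.Dict.get?_insert]
      rw [h2] at hx
      by_cases hveq : v = pvP cnt (c+1)
      · subst hveq
        simp [pvFirst, hx]
      · rw [if_neg hveq, h2 v]
        cases hv : pvFirst cnt v c with
        | some k => simp [pvFirst, hv]
        | none =>
          have : pvP cnt (c+1) ≠ v := fun heq => hveq heq.symm
          simp [pvFirst, hv, this]
  · -- the best-area update agrees
    by_cases hcase : pvP cnt (c+1) - lp.2 = h
    · have hfirst : pvFirst cnt (pvP cnt (c+1) - h) c = some ((lp.1 : Nat) : Int) := by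
        apply pvFirst_some cnt _ c lp.1
        · -- lp.1 = c+1 would force h = 0
          rcases Nat.lt_or_ge lp.1 (c+1) with hl | hg
          · omega
          · exfalso
            have hleq : lp.1 = c+1 := by omega
            rw [hleq] at ha1
            rw [ha1] at hcase
            omega
        · rw [ha1] at hcase; omega
        · intro j hj
          have := ha3 j hj
          omega
      rw [h2 (pvP cnt (c+1) - h), hfirst]
      simp [hcase, h3]
    · have hlt : pvP cnt (c+1) - pvP cnt lp.1 < h := by
        rw [ha1] at hcase
        omega
      have hfirst : pvFirst cnt (pvP cnt (c+1) - h) c = none := by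
        apply pvFirst_none
        intro j hj
        rcases Nat.lt_or_ge j lp.1 with hl | hg
        · have := ha3 j hl
          omega
        · have := hmono hg
          omega
      rw [h2 (pvP cnt (c+1) - h), hfirst]
      simp [hcase, h3]

theorem pvInv_fold (cnt : List Int) (h : Int) (mN : Nat) (a : Int)
    (hh : 1 ≤ h) (hnn : ∀ i, 0 ≤ cnt.getD i 0) :
    ∀ c, c ≤ mN →
      pvInv cnt h c
        ((List.range c).foldl (pvStepA (0 :: cnt) h)
          (0, (PySem.Dict.empty : PySem.Dict Int Int).insert 0 0, a))
        ((List.range c).foldl (pvStepB cnt h mN) (0, 0, 0, a)) := by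
  intro c
  induction c with
  | zero =>
    intro _
    simp only [List.range_zero, List.foldl_nil]
    unfold pvInv
    refine ⟨rfl, ?_, rfl, rfl, rfl, by simp only [pvP]; omega, by intro j hj; omega⟩
    intro v
    rw [PySem.Dict.get?_insert, PySem.Dict.get?_empty]
    unfold pvFirst
    simp only [pvP]
    by_cases hv : v = 0
    · subst hv; simp
    · have : (0:Int) ≠ v := fun heq => hv heq.symm
      simp [hv, this]
  | succ c ih =>
    intro hc
    rw [List.range_succ, List.foldl_append, List.foldl_append]
    simp only [List.foldl_cons, List.foldl_nil]
    exact pvInv_step cnt h mN hh hnn c (by omega) _ _ (ih (by omega))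

-- the core: A's hashmap inner loop equals B's two-pointer inner loop
theorem inner_eq (cnt : List Int) (h : Int) (mN : Nat) (a : Int)
    (hh : 1 ≤ h) (hnn : ∀ i, 0 ≤ cnt.getD i 0) :
    pvInnerA (0 :: cnt) h mN a = pvInnerB cnt h mN a := by
  have := pvInv_fold cnt h mN a hh hnn mN (le_refl mN)
  exact this.2.2.1

-- table characterization
theorem pvTableA_length (matrix : List String) (mN : Nat) (k : Nat) :
    (pvTableA matrix mN k).length = k := by
  induction k using Nat.strong_induction_on with
  | _ k ih =>
    match k with
    | 0 => simp [pvTableA]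
    | 1 => simp [pvTableA]
    | (i+2) => simp [pvTableA, ih (i+1) (by omega)]

theorem pvTableA_getD (matrix : List String) (mN : Nat) :
    ∀ k r, r < k → (pvTableA matrix mN k).getD r [] =
      0 :: (List.range mN).map (fun j => pvC matrix j r) := by
  intro k
  induction k using Nat.strong_induction_on with
  | _ k ih =>
    match k with
    | 0 => intro r hr; omega
    | 1 =>
      intro r hr
      have : r = 0 := by omega
      subst this
      show (List.replicate (mN+1) 0 : List Int) = _
      rw [List.map_congr_left (f := fun j => pvC matrix j 0) (g := fun _ => (0:Int))
            (by intro j _; simp [pvC])]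
      simp [List.map_const', List.replicate_succ]
    | (i+2) =>
      intro r hr
      rcases Nat.lt_or_ge r (i+1) with hl | hg
      · show ((pvTableA matrix mN (i+1)) ++ _).getD r [] = _
        rw [List.getD_append _ _ _ _ (by rw [pvTableA_length]; omega)]
        exact ih (i+1) (by omega) r hl
      · have hreq : r = i+1 := by omega
        subst hreq
        show ((pvTableA matrix mN (i+1)) ++ [pvRowA matrix mN ((pvTableA matrix mN (i+1)).getD i []) (i+1)]).getD (i+1) [] = _
        rw [List.getD_append_right _ _ _ _ (by rw [pvTableA_length])]
        rw [pvTableA_length]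
        simp only [Nat.sub_self, List.getD_cons_zero]
        rw [ih (i+1) (by omega) i (by omega)]
        unfold pvRowA
        congr 1
        apply List.map_congr_left
        intro j hj
        have hjm : j < mN := List.mem_range.mp hj
        rw [List.getD_cons_succ]
        rw [List.getD_eq_getElem _ _ (by simpa using hjm)]
        simp only [List.getElem_map, List.getElem_range]
        have hcast : ((i+1 : Nat) : Int) - 1 = (i : Int) := by push_cast; ring
        rw [hcast]
        simp [pvC]

-- B's count update equals the canonical step
theorem pvCnt_step (matrix : List String) (mN t k : Nat) :
    (PySem.List.enumerate (pvCnt matrix mN t k)).map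
        (fun jc => jc.2 + pvBit matrix ((t + k : Nat) : Int) jc.1) =
      pvCnt matrix mN t (k+1) := by
  apply List.ext_getElem
  · simp [PySem.List.length_enumerate, pvCnt]
  · intro i h1 h2
    simp only [List.getElem_map, PySem.List.getElem_enumerate]
    unfold pvCnt
    simp only [List.getElem_map, List.getElem_range]
    have : t + (k+1) = (t + k) + 1 := by omega
    rw [this]
    simp only [pvC]
    push_cast
    simp only [zero_add]
    ring

theorem pvCnt_zero (matrix : List String) (mN t : Nat) :
    (List.replicate mN 0 : List Int) = pvCnt matrix mN t 0 := by
  unfold pvCnt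
  rw [List.map_congr_left (f := fun j => pvC matrix j (t+0) - pvC matrix j t)
        (g := fun _ => (0:Int)) (by intro j _; simp)]
  simp [List.map_const']

-- per-top glue: B's incremental bottom loop equals A's table-driven bottom loop
theorem glue_bottom (matrix : List String) (mN nN t : Nat) :
    ∀ k, t + k ≤ nN → ∀ acc : Int,
      (((List.range k).foldl (fun (st : List Int × Int) b =>
          let bottom := t + b
          let cnt := (PySem.List.enumerate st.1).map (fun jc => jc.2 + pvBit matrix (bottom : Int) jc.1)
          let h : Int := (bottom : Int) - (t : Int) + 1
          (cnt, pvInnerB cnt h mN st.2))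
        (List.replicate mN 0, acc)).1 = pvCnt matrix mN t k) ∧
      (((List.range k).foldl (fun (st : List Int × Int) b =>
          let bottom := t + b
          let cnt := (PySem.List.enumerate st.1).map (fun jc => jc.2 + pvBit matrix (bottom : Int) jc.1)
          let h : Int := (bottom : Int) - (t : Int) + 1
          (cnt, pvInnerB cnt h mN st.2))
        (List.replicate mN 0, acc)).2
       = (List.range k).foldl (fun best b =>
          let top := t + 1
          let bottom := top + b
          let count : List Int := 0 :: (List.range mN).map (fun j =>
            (((pvTableA matrix mN (nN+1)).getD bottom []).getD (j+1) 0) -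
            (((pvTableA matrix mN (nN+1)).getD (top-1) []).getD (j+1) 0))
          let h : Int := (bottom : Int) - (top : Int) + 1
          pvInnerA count h mN best) acc) := by
  intro k
  induction k with
  | zero =>
    intro _ acc
    simp only [List.range_zero, List.foldl_nil]
    exact ⟨pvCnt_zero matrix mN t, trivial⟩
  | succ k ih =>
    intro hk acc
    obtain ⟨ih1, ih2⟩ := ih (by omega) acc
    rw [List.range_succ, List.foldl_append, List.foldl_append]
    simp only [List.foldl_cons, List.foldl_nil]
    rw [ih1, ih2]
    have hcnt : (PySem.List.enumerate (pvCnt matrix mN t k)).map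
        (fun jc => jc.2 + pvBit matrix ((t + k : Nat) : Int) jc.1) = pvCnt matrix mN t (k+1) :=
      pvCnt_step matrix mN t k
    have hcount : (0 :: (List.range mN).map (fun j =>
        (((pvTableA matrix mN (nN+1)).getD (t+1+k) []).getD (j+1) 0) -
        (((pvTableA matrix mN (nN+1)).getD (t+1-1) []).getD (j+1) 0)) : List Int)
        = 0 :: pvCnt matrix mN t (k+1) := by
      congr 1
      rw [pvTableA_getD matrix mN (nN+1) (t+1+k) (by omega),
          pvTableA_getD matrix mN (nN+1) (t+1-1) (by omega)]
      unfold pvCnt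
      apply List.map_congr_left
      intro j hj
      have hjm : j < mN := List.mem_range.mp hj
      rw [List.getD_cons_succ, List.getD_cons_succ]
      rw [List.getD_eq_getElem _ _ (by simpa using hjm), List.getD_eq_getElem _ _ (by simpa using hjm)]
      simp only [List.getElem_map, List.getElem_range]
      have : t + 1 + k = t + (k+1) := by omega
      rw [this]
      have : t + 1 - 1 = t := by omega
      rw [this]
    constructor
    · exact hcnt
    · rw [hcnt, hcount]
      have hheq : ((t + k : Nat) : Int) - (t : Int) + 1 = ((t+1+k : Nat) : Int) - ((t+1 : Nat) : Int) + 1 := by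
        push_cast; ring
      rw [hheq]
      exact (inner_eq (pvCnt matrix mN t (k+1)) _ mN _
        (by push_cast; omega) (fun i => pvCnt_nonneg matrix mN t (k+1) i)).symm

-- ===== VERDICT (by name: the statement is the Claim_ definition above) =====
theorem max_good_subrectangle_spec : Claim_equal_max_good_subrectangle := by
  intro n m matrix _ _
  unfold Spec_max_good_subrectangle max_good_subrectangle max_good_subrectangle_alt
  apply PySem.List.foldl_congr_mem'
  intro t ht acc
  have htlt : t < n.toNat := List.mem_range.mp ht
  have hn1 : (n+1).toNat = n.toNat + 1 := by omega
  rw [hn1]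
  exact (glue_bottom matrix m.toNat n.toNat t (n.toNat - t) (by omega) acc).2.symm
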